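-- pv_equiv track=rewrite | github.com/csv610/CompGeom | src/compgeom/algo/space_filling_curves.py | sweep_3d
-- ===== SOURCE A (Python) =====
-- from typing import List, Tuple
--
-- def sweep_3d(width: int, height: int, depth: int) -> List[Tuple[int, int, int]]:
--     """Generate a 3D sweep path as (x,y,z) coordinates (layer by layer)."""
--     path = []
--     for z in range(depth):
--         for y in range(height):
--             row = []
--             for x in range(width):
--                 row.append((x, y, z))
--             if (y + z) % 2 == 1:
--                 row.reverse()
--             path.extend(row)
--     return path
-- ===== SOURCE B (Python) =====
-- def sweep_3d(width, height, depth):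
--     """Generate a 3D sweep path as (x,y,z) coordinates (layer by layer)."""
--     if width <= 0 or height <= 0 or depth <= 0:
--         return []
--     layer = width * height
--     path = []
--     for k in range(layer * depth):
--         z = k // layer
--         r = k - z * layer
--         y = r // width
--         x = r - y * width
--         if (y + z) % 2:
--             x = width - 1 - x
--         path.append((x, y, z))
--     return path
-- ===== Notes on version B (the rewrite author's own statement) =====
-- stated objective: alternative
-- what changed: Replaces the three nested loops with row buffering and conditional in-place reversal by a single loop over the flat cell index k that decodes (z,y,x) arithmetically via divmod and applies the boustrophedon mirror width-1-x in closed form.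
import Mathlib
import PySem

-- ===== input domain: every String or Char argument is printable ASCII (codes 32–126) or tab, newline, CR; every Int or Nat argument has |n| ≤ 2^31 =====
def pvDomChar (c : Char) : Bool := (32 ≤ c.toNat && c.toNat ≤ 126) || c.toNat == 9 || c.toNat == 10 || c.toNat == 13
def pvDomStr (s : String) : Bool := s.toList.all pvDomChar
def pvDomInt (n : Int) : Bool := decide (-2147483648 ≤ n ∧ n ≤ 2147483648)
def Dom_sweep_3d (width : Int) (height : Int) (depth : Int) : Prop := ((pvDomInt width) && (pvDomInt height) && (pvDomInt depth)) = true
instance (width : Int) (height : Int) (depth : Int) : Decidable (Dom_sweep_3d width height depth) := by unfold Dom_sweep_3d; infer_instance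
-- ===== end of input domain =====

-- B replaces the triple nested loop with row buffer and conditional reversal by a single loop
-- over the flat cell index k, decoding (z,y,x) by divmod and mirroring x arithmetically
-- (objective: alternative).

-- ===== PORT A =====
def sweep_3d (width : Int) (height : Int) (depth : Int) : List (Int × Int × Int) :=
  (PySem.List.pyRange 0 depth 1).foldl (fun path z =>
    (PySem.List.pyRange 0 height 1).foldl (fun path y =>
      let row := (PySem.List.pyRange 0 width 1).foldl (fun row x => row ++ [(x, y, z)]) []
      let row := if PySem.Int.mod (y + z) 2 = 1 then row.reverse else row
      path ++ row) path) []

-- ===== PORT B =====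
def sweep_3d_alt (width : Int) (height : Int) (depth : Int) : List (Int × Int × Int) :=
  if width ≤ 0 ∨ height ≤ 0 ∨ depth ≤ 0 then []
  else
    let layer := width * height
    (PySem.List.pyRange 0 (layer * depth) 1).foldl (fun path k =>
      let z := PySem.Int.floordiv k layer
      let r := k - z * layer
      let y := PySem.Int.floordiv r width
      let x0 := r - y * width
      let x := if PySem.Int.mod (y + z) 2 ≠ 0 then width - 1 - x0 else x0
      path ++ [(x, y, z)]) []

-- ===== PRECONDITION & SPEC =====
def Spec_sweep_3d (width : Int) (height : Int) (depth : Int) (out : List (Int × Int × Int)) : Prop := out = sweep_3d_alt width height depth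
instance (width : Int) (height : Int) (depth : Int) (out : List (Int × Int × Int)) : Decidable (Spec_sweep_3d width height depth out) := by unfold Spec_sweep_3d; infer_instance

-- ===== CLAIM (what is proved, stated in full; the proofs are below) =====
def Claim_equal_sweep_3d : Prop := ∀ (width : Int) (height : Int) (depth : Int), Dom_sweep_3d width height depth → Spec_sweep_3d width height depth (sweep_3d width height depth)

-- ===== LEMMAS AND PROOFS =====

-- reversing the row [(0,y,z),…,(w-1,y,z)] is the same as mirroring x to w-1-x
theorem row_reverse_eq_mirror (w y z : Int) :
    ((PySem.List.pyRange 0 w 1).map (fun x => ((x : Int), y, z))).reverse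
      = (PySem.List.pyRange 0 w 1).map (fun x => (w - 1 - x, y, z)) := by
  have hr : (PySem.List.pyRange 0 w 1).reverse = PySem.List.pyRange (w - 1) (-1) (-1) := by
    rw [PySem.List.pyRange_neg_one_eq_reverse]; norm_num
  rw [← List.map_reverse, hr]
  simp [PySem.List.pyRange_neg_one, PySem.List.pyRange_one, List.map_map, Function.comp]

-- A equals the canonical boustrophedon flatMap form
theorem sweep_A_flat (w h d : Int) : sweep_3d w h d =
    (PySem.List.pyRange 0 d 1).flatMap (fun z =>
      (PySem.List.pyRange 0 h 1).flatMap (fun y =>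
        (PySem.List.pyRange 0 w 1).map (fun x =>
          (if PySem.Int.mod (y + z) 2 = 1 then w - 1 - x else x, y, z)))) := by
  unfold sweep_3d
  rw [show (fun (path : List (Int × Int × Int)) (z : Int) =>
      (PySem.List.pyRange 0 h 1).foldl (fun path y =>
        let row := (PySem.List.pyRange 0 w 1).foldl (fun row x => row ++ [(x, y, z)]) []
        let row := if PySem.Int.mod (y + z) 2 = 1 then row.reverse else row
        path ++ row) path)
    = (fun path z => path ++ (PySem.List.pyRange 0 h 1).flatMap (fun y =>
        (PySem.List.pyRange 0 w 1).map (fun x =>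
          (if PySem.Int.mod (y + z) 2 = 1 then w - 1 - x else x, y, z)))) from ?_,
    PySem.List.foldl_append_eq_flatMap]
  · simp
  · funext path z
    rw [PySem.List.foldl_append_eq_flatMap]
    congr 1
    apply List.flatMap_congr
    intro y _
    simp only [PySem.List.foldl_append_singleton_eq_map, List.nil_append]
    by_cases hp : PySem.Int.mod (y + z) 2 = 1
    · rw [if_pos hp, row_reverse_eq_mirror]
      simp only [if_pos hp]
    · rw [if_neg hp]
      simp only [if_neg hp]

-- flat-index decoding over range (a*b) equals the nested traversal
theorem range_mul_decode {α : Type} (a b : Nat) (f : Nat → Nat → α) :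
    (List.range (a * b)).map (fun k => f (k / b) (k % b))
      = (List.range a).flatMap (fun i => (List.range b).map (fun j => f i j)) := by
  induction a with
  | zero => simp
  | succ a ih =>
    rw [Nat.succ_mul, List.range_add, List.map_append, ih, List.range_succ,
      List.flatMap_append]
    congr 1
    · simp only [List.flatMap_cons, List.flatMap_nil, List.append_nil, List.map_map]
      apply List.map_congr_left
      intro j hj
      have hjb : j < b := List.mem_range.mp hj
      have hb : 0 < b := Nat.pos_of_ne_zero (by omega)
      simp only [Function.comp]
      congr 1
      · rw [Nat.add_comm, Nat.add_mul_div_right _ _ hb, Nat.div_eq_of_lt hjb]; omega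
      · rw [Nat.add_comm, Nat.add_mul_mod_self_right, Nat.mod_eq_of_lt hjb]

-- a nonnegative integer has nonzero remainder mod 2 iff the remainder is 1
theorem mod2_if {α : Type} (n : Int) (_hn : 0 ≤ n) (a b : α) :
    (if PySem.Int.mod n 2 ≠ 0 then a else b) = (if PySem.Int.mod n 2 = 1 then a else b) := by
  rw [PySem.Int.mod_eq_emod_of_pos (by norm_num)]
  have h2 : n % 2 = 0 ∨ n % 2 = 1 := by omega
  rcases h2 with h | h <;> simp [h]

theorem sweep_eq (w h d : Int) : sweep_3d w h d = sweep_3d_alt w h d := by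
  rw [sweep_A_flat]
  by_cases hdeg : w ≤ 0 ∨ h ≤ 0 ∨ d ≤ 0
  · rw [sweep_3d_alt, if_pos hdeg]
    rcases hdeg with hz | hz | hz <;>
      simp [PySem.List.pyRange_one_eq_nil hz]
  · push Not at hdeg
    obtain ⟨hw, hh, hd⟩ := hdeg
    obtain ⟨W, rfl⟩ : ∃ n : ℕ, w = (n : Int) := ⟨w.toNat, (Int.toNat_of_nonneg hw.le).symm⟩
    obtain ⟨H, rfl⟩ : ∃ n : ℕ, h = (n : Int) := ⟨h.toNat, (Int.toNat_of_nonneg hh.le).symm⟩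
    obtain ⟨D, rfl⟩ : ∃ n : ℕ, d = (n : Int) := ⟨d.toNat, (Int.toNat_of_nonneg hd.le).symm⟩
    rw [sweep_3d_alt, if_neg (by push Not; exact ⟨hw, hh, hd⟩)]
    have e1 : ((W * H) * D : ℕ) = D * (W * H) := by ring
    have esub : ∀ (k L : ℕ), (k : Int) - ((k / L * L : ℕ) : Int) = ((k % L : ℕ) : Int) := by
      intro k L
      push_cast
      rw [Int.emod_def]
      ring
    simp only [← Nat.cast_mul, e1, PySem.List.pyRange_zero_natCast, List.foldl_map,
      List.flatMap_map, List.map_map, PySem.List.foldl_append_singleton_eq_map,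
      List.nil_append, PySem.Int.floordiv_natCast, esub]
    rw [range_mul_decode D (W * H) (fun z r =>
      ((if PySem.Int.mod ((((r / W : ℕ) : Int)) + ((z : ℕ) : Int)) 2 ≠ 0
          then (W : Int) - 1 - ((r % W : ℕ) : Int) else ((r % W : ℕ) : Int)),
        ((r / W : ℕ) : Int), ((z : ℕ) : Int)))]
    apply List.flatMap_congr
    intro Z _
    rw [mul_comm W H, range_mul_decode H W (fun y x =>
      ((if PySem.Int.mod (((y : ℕ) : Int) + ((Z : ℕ) : Int)) 2 ≠ 0
          then (W : Int) - 1 - ((x : ℕ) : Int) else ((x : ℕ) : Int)),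
        ((y : ℕ) : Int), ((Z : ℕ) : Int)))]
    apply List.flatMap_congr
    intro Y _
    apply List.map_congr_left
    intro X _
    simp only [Function.comp]
    rw [mod2_if (((Y : ℕ) : Int) + ((Z : ℕ) : Int)) (by positivity)]

-- ===== VERDICT (by name: the statement is the Claim_ definition above) =====
theorem sweep_3d_spec : Claim_equal_sweep_3d := by
  intro w h d _
  unfold Spec_sweep_3d
  exact sweep_eq w h d
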